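-- pv_equiv track=rewrite | github.com/limit5/OmniSight-Productizer | backend/ios_scaffolder.py | _looks_like_bundle_id
-- ===== SOURCE A (Python) =====
-- def _looks_like_bundle_id(bundle_id: str) -> bool:
--     parts = bundle_id.split(".")
--     if len(parts) < 2:
--         return False
--     for part in parts:
--         if not part:
--             return False
--         if not all(c.isalnum() or c in ("-", "_") for c in part):
--             return False
--     return True
-- ===== SOURCE B (Python) =====
-- def _looks_like_bundle_id(bundle_id: str) -> bool:
--     seg_empty = True
--     saw_dot = False
--     for c in bundle_id:
--         if c == ".":
--             if seg_empty:
--                 return False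
--             seg_empty = True
--             saw_dot = True
--         else:
--             if not (c.isalnum() or c in ("-", "_")):
--                 return False
--             seg_empty = False
--     return saw_dot and not seg_empty
-- ===== Notes on version B (the rewrite author's own statement) =====
-- stated objective: faster
-- what changed: Replaces split('.') plus a per-part validation loop by a single character scan maintaining a 'current segment empty' flag and a 'saw a dot' flag, so no intermediate list of parts is built.
import Mathlib
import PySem

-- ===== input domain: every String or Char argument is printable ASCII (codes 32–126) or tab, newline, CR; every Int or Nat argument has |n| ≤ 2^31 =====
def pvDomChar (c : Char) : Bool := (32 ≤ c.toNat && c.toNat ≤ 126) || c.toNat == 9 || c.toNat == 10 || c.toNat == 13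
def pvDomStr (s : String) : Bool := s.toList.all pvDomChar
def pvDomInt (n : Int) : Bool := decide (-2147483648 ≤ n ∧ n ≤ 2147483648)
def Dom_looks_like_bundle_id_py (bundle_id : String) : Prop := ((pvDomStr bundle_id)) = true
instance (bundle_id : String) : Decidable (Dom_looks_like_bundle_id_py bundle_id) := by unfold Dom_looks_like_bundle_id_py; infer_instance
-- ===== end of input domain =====

-- B replaces split('.')-then-validate-each-part by a single scan with segment-state flags (same result, no parts list).


-- ===== PORT A =====
-- c.isalnum() or c in ("-", "_")
def pvValidChar (c : Char) : Bool := PySem.Chars.isalnum c || c == '-' || c == '_'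

-- the 'for part in parts' loop with its two early returns
def pvCheckParts : List (List Char) → Bool
  | [] => true
  | p :: ps =>
    if p.isEmpty then false
    else if !(p.all pvValidChar) then false
    else pvCheckParts ps

def looks_like_bundle_id_py (bundle_id : String) : Bool :=
  let parts := PySem.Chars.splitOn bundle_id.toList ['.']
  if parts.length < 2 then false
  else pvCheckParts parts

-- ===== PORT B =====
-- the single scan of Source B: seg_empty / saw_dot flags, early returns
def pvAltLoop : List Char → Bool → Bool → Bool
  | [], segEmpty, sawDot => sawDot && !segEmpty
  | c :: t, segEmpty, sawDot =>
    if c = '.' then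
      if segEmpty then false else pvAltLoop t true true
    else
      if !(PySem.Chars.isalnum c || c == '-' || c == '_') then false
      else pvAltLoop t false sawDot

def looks_like_bundle_id_py_alt (bundle_id : String) : Bool :=
  pvAltLoop bundle_id.toList true false

-- ===== PRECONDITION & SPEC =====
def Spec_looks_like_bundle_id_py (bundle_id : String) (out : Bool) : Prop := out = looks_like_bundle_id_py_alt bundle_id
instance (bundle_id : String) (out : Bool) : Decidable (Spec_looks_like_bundle_id_py bundle_id out) := by unfold Spec_looks_like_bundle_id_py; infer_instance

-- ===== CLAIM (what is proved, stated in full; the proofs are below) =====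
def Claim_equal_looks_like_bundle_id_py : Prop := ∀ (bundle_id : String), Dom_looks_like_bundle_id_py bundle_id → Spec_looks_like_bundle_id_py bundle_id (looks_like_bundle_id_py bundle_id)

-- ===== LEMMAS AND PROOFS =====

-- reference split-on-'.' as a plain structural recursion
def pvSplitDot : List Char → List (List Char)
  | [] => [[]]
  | c :: t => if c = '.' then [] :: pvSplitDot t else (pvSplitDot t).modifyHead (c :: ·)

theorem pvSplitDot_ne_nil (cs : List Char) : pvSplitDot cs ≠ [] := by
  induction cs with
  | nil => simp [pvSplitDot]
  | cons c t ih =>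
    simp only [pvSplitDot]
    split
    · simp
    · cases h : pvSplitDot t with
      | nil => exact absurd h ih
      | cons p ps => simp

theorem pv_go_spec (fuel : Nat) : ∀ (cs cur : List Char) (acc : List (List Char)),
    cs.length ≤ fuel →
    PySem.Chars.splitOn.go ['.'] fuel cs cur acc
      = acc.reverse ++ (pvSplitDot cs).modifyHead (cur.reverse ++ ·) := by
  induction fuel with
  | zero =>
    intro cs cur acc h
    have : cs = [] := List.eq_nil_of_length_eq_zero (Nat.le_zero.mp h)
    subst this
    simp [PySem.Chars.splitOn.go, pvSplitDot]
  | succ fuel ih =>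
    intro cs cur acc h
    cases cs with
    | nil => simp [PySem.Chars.splitOn.go, pvSplitDot]
    | cons c rest =>
      simp only [PySem.Chars.splitOn.go, List.isPrefixOf]
      by_cases hc : c = '.'
      · subst hc
        simp only [beq_self_eq_true, Bool.true_and, if_pos]
        rw [show List.drop ['.'].length ('.' :: rest) = rest from rfl]
        rw [ih rest [] (List.reverse cur :: acc) (by simpa using Nat.le_of_succ_le_succ h)]
        simp [pvSplitDot]
        cases hs : pvSplitDot rest with
        | nil => exact absurd hs (pvSplitDot_ne_nil rest)
        | cons p ps => simp
      · rw [if_neg (by simp [beq_iff_eq, Ne.symm hc])]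
        rw [ih rest (c :: cur) acc (by simpa using Nat.le_of_succ_le_succ h)]
        simp only [pvSplitDot, if_neg hc]
        cases hs : pvSplitDot rest with
        | nil => exact absurd hs (pvSplitDot_ne_nil rest)
        | cons p ps => simp

theorem pv_splitOn_eq (cs : List Char) :
    PySem.Chars.splitOn cs ['.'] = pvSplitDot cs := by
  unfold PySem.Chars.splitOn
  rw [pv_go_spec (cs.length + 1) cs [] [] (Nat.le_succ _)]
  simp
  cases hs : pvSplitDot cs with
  | nil => exact absurd hs (pvSplitDot_ne_nil cs)
  | cons p ps => simp

def pvOkPart (p : List Char) : Bool := !p.isEmpty && p.all pvValidChar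

-- invariant of B's scan expressed over the split parts
def pvG : Bool → Bool → List (List Char) → Bool
  | e, d, [] => d && !e
  | e, d, [p] => p.all pvValidChar && (d && !(e && p.isEmpty))
  | e, _, p :: q :: ps => p.all pvValidChar && !(e && p.isEmpty) && pvG true true (q :: ps)

theorem pvAltLoop_eq_pvG (cs : List Char) : ∀ e d,
    pvAltLoop cs e d = pvG e d (pvSplitDot cs) := by
  induction cs with
  | nil => intro e d; cases d <;> cases e <;> simp [pvAltLoop, pvSplitDot, pvG]
  | cons c t ih =>
    intro e d
    by_cases hc : c = '.'
    · subst hc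
      simp only [pvAltLoop, pvSplitDot, reduceIte]
      cases hs : pvSplitDot t with
      | nil => exact absurd hs (pvSplitDot_ne_nil t)
      | cons p ps =>
        rw [show pvG e d ([] :: p :: ps) = (!e && pvG true true (p :: ps)) by
          simp [pvG]]
        cases e with
        | true => simp
        | false => simp [ih, hs]
    · simp only [pvAltLoop, pvSplitDot, if_neg hc]
      cases hs : pvSplitDot t with
      | nil => exact absurd hs (pvSplitDot_ne_nil t)
      | cons p ps =>
        rw [ih, hs]
        simp only [List.modifyHead]
        by_cases hv : (PySem.Chars.isalnum c || c == '-' || c == '_') = true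
        · cases ps with
          | nil =>
            cases d <;> cases e <;> cases hp : p.all pvValidChar <;>
              simp [pvG, hv, pvValidChar, hp]
          | cons q ps' =>
            cases hp : p.all pvValidChar <;> simp [pvG, hv, pvValidChar, hp]
        · have hv' : pvValidChar c = false := by
            simpa [pvValidChar] using hv
          cases ps with
          | nil => simp [pvG, hv, hv']
          | cons q ps' => simp [pvG, hv, hv']

theorem pvG_true_true (p : List Char) (ps : List (List Char)) :
    pvG true true (p :: ps) = (p :: ps).all pvOkPart := by
  induction ps generalizing p with
  | nil => simp [pvG, pvOkPart]; cases hp : p.all pvValidChar <;> cases he : p.isEmpty <;> simp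
  | cons q ps' ih =>
    simp only [pvG, List.all_cons, ih q, pvOkPart]
    cases hp : p.all pvValidChar <;> cases he : p.isEmpty <;> simp

theorem pvCheckParts_eq_all (parts : List (List Char)) :
    pvCheckParts parts = parts.all pvOkPart := by
  induction parts with
  | nil => simp [pvCheckParts]
  | cons p ps ih =>
    simp only [pvCheckParts, List.all_cons, pvOkPart, ih]
    cases he : p.isEmpty <;> cases hp : p.all pvValidChar <;> simp

-- ===== VERDICT (by name: the statement is the Claim_ definition above) =====
theorem looks_like_bundle_id_py_spec : Claim_equal_looks_like_bundle_id_py := by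
  intro s _
  unfold Spec_looks_like_bundle_id_py looks_like_bundle_id_py looks_like_bundle_id_py_alt
  rw [pv_splitOn_eq, pvAltLoop_eq_pvG]
  simp only []
  rw [pvCheckParts_eq_all]
  cases hs : pvSplitDot s.toList with
  | nil => exact absurd hs (pvSplitDot_ne_nil s.toList)
  | cons p ps =>
    cases ps with
    | nil => simp [pvG]
    | cons q ps' =>
      have := pvG_true_true q ps'
      simp only [pvG, List.all_cons, pvOkPart, this, List.length_cons]
      have hlen : ¬ (ps'.length + 1 + 1 < 2) := by omega
      rw [if_neg hlen]
      cases hp : p.all pvValidChar <;> cases he : p.isEmpty <;> simp
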